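-- pv_equiv track=rewrite | github.com/TrevorNight/UTN-FRA | UTN-PROGRAMACION/Programacion_I/05_misc/01_menu_arrays_funciones/Package_Arrays/Especificas.py | listar_posicion_numeros_impares
-- ===== SOURCE A (Python) =====
-- def listar_posicion_numeros_impares(lista_numeros:list , cantidad_numeros:int) ->list:
--     cantidad_impares = 0
--     for posicion in range(cantidad_numeros):
--         if lista_numeros[posicion] % 2 != 0:
--             cantidad_impares = cantidad_impares + 1
--
--     lista_posicion_impares = [0] * cantidad_impares
--     posicion2 = -1
--     for posicion in range(cantidad_numeros):
--         if lista_numeros[posicion] % 2 != 0: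
--             posicion2 = posicion2 + 1
--             lista_posicion_impares[posicion2] = posicion
--
--     return lista_posicion_impares
-- ===== SOURCE B (Python) =====
-- def listar_posicion_numeros_impares(lista_numeros: list, cantidad_numeros: int) -> list:
--     # Single pass: append each odd position directly; no counting pass,
--     # no pre-sized array, no manual cursor.  Iterates range(cantidad_numeros)
--     # so indexing behaves exactly as in the original.
--     return [posicion for posicion in range(cantidad_numeros)
--             if lista_numeros[posicion] % 2 != 0]
-- ===== Notes on version B (the rewrite author's own statement) =====
-- stated objective: simpler
-- what changed: Replaced the two-pass scheme (count odds, pre-allocate [0]*count, refill via a manual cursor posicion2) by a single filtering pass that appends each odd position directly.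
import Mathlib
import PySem

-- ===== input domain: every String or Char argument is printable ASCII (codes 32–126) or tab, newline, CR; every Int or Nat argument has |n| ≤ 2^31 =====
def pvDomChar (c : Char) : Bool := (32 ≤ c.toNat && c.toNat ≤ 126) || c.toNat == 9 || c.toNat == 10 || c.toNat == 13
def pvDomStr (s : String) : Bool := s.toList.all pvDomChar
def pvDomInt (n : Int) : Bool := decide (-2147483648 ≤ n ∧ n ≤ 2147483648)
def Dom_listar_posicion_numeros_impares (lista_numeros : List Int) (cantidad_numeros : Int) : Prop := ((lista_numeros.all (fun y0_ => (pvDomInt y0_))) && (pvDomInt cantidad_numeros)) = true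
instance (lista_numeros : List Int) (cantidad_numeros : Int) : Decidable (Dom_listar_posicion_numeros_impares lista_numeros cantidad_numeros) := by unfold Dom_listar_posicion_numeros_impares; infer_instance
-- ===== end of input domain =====

-- B drops A's counting pass, pre-sized [0]*count array and manual cursor, and
-- builds the result in one filtering pass (same values; no speed claim).

-- ===== PORT A =====
def listar_posicion_numeros_impares (lista_numeros : List Int) (cantidad_numeros : Int) : List Int :=
  let cantidad_impares : Int :=
    (PySem.List.pyRange 0 cantidad_numeros 1).foldl
      (fun c posicion =>
        if PySem.Int.mod (PySem.List.pyGetD lista_numeros posicion 0) 2 ≠ 0 then c + 1 else c) 0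
  let lista_posicion_impares : List Int := List.replicate cantidad_impares.toNat 0
  let r :=
    (PySem.List.pyRange 0 cantidad_numeros 1).foldl
      (fun st posicion =>
        if PySem.Int.mod (PySem.List.pyGetD lista_numeros posicion 0) 2 ≠ 0 then
          (st.1 + 1, st.2.set (st.1 + 1).toNat posicion)
        else st)
      (-1, lista_posicion_impares)
  r.2

-- ===== PORT B =====
def listar_posicion_numeros_impares_alt (lista_numeros : List Int) (cantidad_numeros : Int) : List Int :=
  (PySem.List.pyRange 0 cantidad_numeros 1).filter
    (fun posicion => decide (PySem.Int.mod (PySem.List.pyGetD lista_numeros posicion 0) 2 ≠ 0))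

-- ===== PRECONDITION & SPEC =====
-- A raises IndexError when cantidad_numeros exceeds len(lista_numeros); B raises there too.
def Pre_listar_posicion_numeros_impares (lista_numeros : List Int) (cantidad_numeros : Int) : Prop :=
  cantidad_numeros ≤ (lista_numeros.length : Int)
instance (lista_numeros : List Int) (cantidad_numeros : Int) : Decidable (Pre_listar_posicion_numeros_impares lista_numeros cantidad_numeros) := by unfold Pre_listar_posicion_numeros_impares; infer_instance

def pvWitness_listar_posicion_numeros_impares : List Int × Int := ([3, 4, 5, 6], 4)

def Spec_listar_posicion_numeros_impares (lista_numeros : List Int) (cantidad_numeros : Int) (out : List Int) : Prop := out = listar_posicion_numeros_impares_alt lista_numeros cantidad_numeros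
instance (lista_numeros : List Int) (cantidad_numeros : Int) (out : List Int) : Decidable (Spec_listar_posicion_numeros_impares lista_numeros cantidad_numeros out) := by unfold Spec_listar_posicion_numeros_impares; infer_instance

-- ===== CLAIM (what is proved, stated in full; the proofs are below) =====
def Claim_equal_listar_posicion_numeros_impares : Prop := ∀ (lista_numeros : List Int) (cantidad_numeros : Int), Dom_listar_posicion_numeros_impares lista_numeros cantidad_numeros → Pre_listar_posicion_numeros_impares lista_numeros cantidad_numeros → Spec_listar_posicion_numeros_impares lista_numeros cantidad_numeros (listar_posicion_numeros_impares lista_numeros cantidad_numeros)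

-- ===== LEMMAS AND PROOFS =====

-- A's counting loop computes the length of the filtered list.
theorem pv_count_foldl (q : Int → Bool) (l : List Int) (c : Int) :
    l.foldl (fun c p => if q p then c + 1 else c) c = c + ((l.filter q).length : Int) := by
  induction l generalizing c with
  | nil => simp
  | cons p l ih =>
    by_cases h : q p <;> simp [List.foldl_cons, h, ih] <;> omega

-- Writing into `done ++ r :: rest` at index `done.length` replaces `r`.
theorem pv_set_mid (done rest : List Int) (r p : Int) :
    (done ++ r :: rest).set done.length p = done ++ p :: rest := by
  induction done with
  | nil => simp
  | cons d done ih => simp [List.set_cons_succ, ih]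

-- Invariant of A's filling loop: with cursor `done.length - 1` and buffer
-- `done ++ rest`, where `rest` has one slot per remaining odd position, the
-- loop returns `done ++ l.filter q`.
theorem pv_fill (q : Int → Bool) (l : List Int) (done rest : List Int)
    (h : (l.filter q).length = rest.length) :
    (l.foldl
      (fun st p => if q p then (st.1 + 1, st.2.set (st.1 + 1).toNat p) else st)
      ((done.length : Int) - 1, done ++ rest)).2 = done ++ l.filter q := by
  induction l generalizing done rest with
  | nil =>
    simp at h
    simp [List.filter_nil, List.length_eq_zero_iff.mp h.symm]
  | cons p l ih =>
    by_cases hq : q p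
    · obtain ⟨r, rest', rfl⟩ : ∃ r rest', rest = r :: rest' := by
        cases rest with
        | nil => simp [hq] at h
        | cons r rest' => exact ⟨r, rest', rfl⟩
      have hlen : (l.filter q).length = rest'.length := by
        simpa [hq] using h
      have hset : ((done.length : Int) - 1 + 1).toNat = done.length := by omega
      have := ih (done ++ [p]) rest' hlen
      simp only [List.foldl_cons, hq, if_true]
      simp only [hset, pv_set_mid]
      have harr : done ++ p :: rest' = (done ++ [p]) ++ rest' := by simp
      have hcur : (done.length : Int) - 1 + 1 = ((done ++ [p]).length : Int) - 1 := by
        simp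
      rw [harr, hcur, this]
      simp [List.filter_cons, hq]

    · have := ih done rest (by simpa [hq] using h)
      simp [List.foldl_cons, hq, this]

-- ===== VERDICT (by name: the statement is the Claim_ definition above) =====
theorem listar_posicion_numeros_impares_spec : Claim_equal_listar_posicion_numeros_impares := by
  intro xs n _ _
  unfold Spec_listar_posicion_numeros_impares
  simp only [listar_posicion_numeros_impares, listar_posicion_numeros_impares_alt]
  set q : Int → Bool :=
    fun posicion => decide (PySem.Int.mod (PySem.List.pyGetD xs posicion 0) 2 ≠ 0) with hq
  set l := PySem.List.pyRange 0 n 1 with hl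
  have hfn1 : (fun (c : Int) posicion =>
      if PySem.Int.mod (PySem.List.pyGetD xs posicion 0) 2 ≠ 0 then c + 1 else c) =
      (fun (c : Int) p => if q p then c + 1 else c) := by
    funext c p; rw [hq]; simp only [decide_eq_true_eq]
  have hfn2 : (fun (st : Int × List Int) posicion =>
      if PySem.Int.mod (PySem.List.pyGetD xs posicion 0) 2 ≠ 0 then
        (st.1 + 1, st.2.set (st.1 + 1).toNat posicion) else st) =
      (fun (st : Int × List Int) p =>
        if q p then (st.1 + 1, st.2.set (st.1 + 1).toNat p) else st) := by
    funext st p; rw [hq]; simp only [decide_eq_true_eq]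
  rw [hfn1, hfn2, pv_count_foldl q l 0]
  have htn : ((0 : Int) + ((l.filter q).length : Int)).toNat = (l.filter q).length := by omega
  rw [htn]
  have hfill := pv_fill q l [] (List.replicate (l.filter q).length 0) (by simp)
  simpa using hfill
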